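-- pv_equiv track=rewrite | github.com/doniyor117/Quizzuz-Bot | bot_services/firebase_service.py | get_xp_for_level
-- ===== SOURCE A (Python) =====
-- def get_xp_for_level(level):
--     """Calculate total XP required to reach a specific level."""
--     total = 0
--     for lvl in range(1, level):
--         if lvl <= 10:
--             total += 100
--         elif lvl <= 20:
--             total += 200
--         elif lvl <= 30:
--             total += 300
--         else:
--             total += 500
--     return total
-- ===== SOURCE B (Python) =====
-- def get_xp_for_level(level):
--     """Calculate total XP required to reach a specific level (closed form)."""
--     n = max(level - 1, 0)
--     return (100 * min(n, 10)
--             + 200 * max(min(n, 20) - 10, 0)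
--             + 300 * max(min(n, 30) - 20, 0)
--             + 500 * max(n - 30, 0))
-- ===== Notes on version B (the rewrite author's own statement) =====
-- stated objective: faster
-- what changed: Replaced the per-level loop that adds the bracket cost for each level with a closed-form expression counting the levels in each XP bracket and multiplying by the bracket constants.
import Mathlib
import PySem

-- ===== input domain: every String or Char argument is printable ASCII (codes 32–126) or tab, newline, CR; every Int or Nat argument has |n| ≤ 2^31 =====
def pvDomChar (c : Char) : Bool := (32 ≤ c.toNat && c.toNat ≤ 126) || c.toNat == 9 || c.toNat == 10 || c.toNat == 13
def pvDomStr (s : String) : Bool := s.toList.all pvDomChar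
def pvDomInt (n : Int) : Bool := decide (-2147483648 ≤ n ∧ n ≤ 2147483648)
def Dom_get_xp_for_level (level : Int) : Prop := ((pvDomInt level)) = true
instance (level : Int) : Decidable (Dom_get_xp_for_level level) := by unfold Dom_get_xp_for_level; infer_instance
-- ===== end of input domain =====

-- B replaces A's per-level loop with an O(1) closed form: count levels per XP bracket and multiply by the bracket constants (faster, asymptotic).


-- ===== PORT A =====
def get_xp_for_level (level : Int) : Int :=
  (PySem.List.pyRange 1 level 1).foldl
    (fun total lvl =>
      if lvl ≤ 10 then total + 100
      else if lvl ≤ 20 then total + 200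
      else if lvl ≤ 30 then total + 300
      else total + 500) 0

-- ===== PORT B =====
def get_xp_for_level_alt (level : Int) : Int :=
  let n := max (level - 1) 0
  100 * min n 10 + 200 * max (min n 20 - 10) 0
    + 300 * max (min n 30 - 20) 0 + 500 * max (n - 30) 0

-- ===== PRECONDITION & SPEC =====
def Spec_get_xp_for_level (level : Int) (out : Int) : Prop := out = get_xp_for_level_alt level
instance (level : Int) (out : Int) : Decidable (Spec_get_xp_for_level level out) := by unfold Spec_get_xp_for_level; infer_instance

-- ===== CLAIM (what is proved, stated in full; the proofs are below) =====
def Claim_equal_get_xp_for_level : Prop := ∀ (level : Int), Dom_get_xp_for_level level → Spec_get_xp_for_level level (get_xp_for_level level)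

-- ===== LEMMAS AND PROOFS =====

-- closed form of the loop total over the first n levels (levels 1..n), with arbitrary accumulator t
theorem pv_foldl_closed (n : Nat) (t : Int) :
    (((List.range n).map (fun k : Nat => (1 : Int) + k)).foldl
      (fun total lvl =>
        if lvl ≤ 10 then total + 100
        else if lvl ≤ 20 then total + 200
        else if lvl ≤ 30 then total + 300
        else total + 500) t)
    = t + 100 * min (n : Int) 10 + 200 * max (min (n : Int) 20 - 10) 0
        + 300 * max (min (n : Int) 30 - 20) 0 + 500 * max ((n : Int) - 30) 0 := by
  induction n generalizing t with
  | zero => simp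
  | succ m ih =>
    rw [List.range_succ, List.map_append, List.foldl_append, ih]
    simp only [List.map_cons, List.map_nil, List.foldl_cons, List.foldl_nil]
    split_ifs with h1 h2 h3 <;> push_cast <;> omega

theorem get_xp_for_level_spec : Claim_equal_get_xp_for_level := by
  intro level _
  unfold Spec_get_xp_for_level get_xp_for_level get_xp_for_level_alt
  rw [PySem.List.pyRange_one, pv_foldl_closed]
  have h : ((level - 1).toNat : Int) = max (level - 1) 0 := by omega
  rw [h]
  dsimp only
  omega
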